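-- pv_equiv track=rewrite | github.com/jung-jinyoung/OurAlgoStudy | jinyoung/240902/BOJ_12904.py | check
-- ===== SOURCE A (Python) =====
-- def check(my_long_str, my_short_str):
--
--
--     while len(my_long_str) > len(my_short_str):
--
--         last_char = my_long_str[-1]
--
--         if last_char == "A":
--             my_long_str.pop()
--         else:
--             my_long_str.pop()
--             my_long_str.reverse()
--
--
--     if my_long_str == my_short_str:
--         return True
--     else:
--         return False
-- ===== SOURCE B (Python) =====
-- def check(my_long_str, my_short_str):
--     # Two-pointer view with a reversed flag: pop from the correct end in O(1)
--     # instead of physically reversing the list. Does not mutate my_long_str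
--     # (A pops/reverses it in place); return value is identical.
--     lo, hi, rev = 0, len(my_long_str), False
--     k = len(my_short_str)
--     while hi - lo > k:
--         if rev:
--             c = my_long_str[lo]
--             lo += 1
--         else:
--             c = my_long_str[hi - 1]
--             hi -= 1
--         if c != "A":
--             rev = not rev
--     seg = my_long_str[lo:hi]
--     if rev:
--         seg.reverse()
--     return seg == my_short_str
-- ===== Notes on version B (the rewrite author's own statement) =====
-- stated objective: alternative
-- what changed: Replaces A's pop-then-physical-reverse loop by a two-pointer window (lo, hi) with a reversed flag, consuming one element from the correct end per step and comparing a single slice at the end; B also does not mutate the input list, while A pops/reverses it in place.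
import Mathlib
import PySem

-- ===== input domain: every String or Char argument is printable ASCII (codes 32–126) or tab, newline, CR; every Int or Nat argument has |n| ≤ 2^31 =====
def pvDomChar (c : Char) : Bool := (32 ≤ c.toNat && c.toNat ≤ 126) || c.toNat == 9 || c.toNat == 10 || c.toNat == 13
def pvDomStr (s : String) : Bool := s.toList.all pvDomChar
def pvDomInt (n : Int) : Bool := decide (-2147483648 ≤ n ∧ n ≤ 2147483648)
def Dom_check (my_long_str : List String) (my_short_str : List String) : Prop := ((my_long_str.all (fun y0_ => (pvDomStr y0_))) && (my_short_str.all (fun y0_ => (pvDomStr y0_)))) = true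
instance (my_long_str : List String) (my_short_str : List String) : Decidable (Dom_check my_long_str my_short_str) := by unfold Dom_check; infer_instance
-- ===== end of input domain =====

-- B replaces A's pop-then-physical-reverse loop by a two-pointer window with a
-- reversed flag, consuming from the correct end without ever reversing the list;
-- A mutates my_long_str in place (pop/reverse), B does not: the equivalence proved
-- here is about the return value only.

-- ===== PORT A =====
def checkLoop (my_long_str : List String) (my_short_str : List String) : List String :=
  if _h : my_short_str.length < my_long_str.length then
    match my_long_str.getLast? with
    | none => my_long_str
    | some last_char =>
      if last_char == "A" then
        checkLoop my_long_str.dropLast my_short_str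
      else
        checkLoop my_long_str.dropLast.reverse my_short_str
  else my_long_str
termination_by my_long_str.length
decreasing_by
  · simp only [List.length_dropLast]; omega
  · simp only [List.length_reverse, List.length_dropLast]; omega

def check (my_long_str : List String) (my_short_str : List String) : Bool :=
  if checkLoop my_long_str my_short_str == my_short_str then true else false

-- ===== PORT B =====
def altLoop (k : Nat) (L : List String) (lo hi : Nat) (rev : Bool) : Nat × Nat × Bool :=
  if _h : k < hi - lo then
    if rev then
      let c := L.getD lo ""
      altLoop k L (lo + 1) hi (if c != "A" then !rev else rev)
    else
      let c := L.getD (hi - 1) ""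
      altLoop k L lo (hi - 1) (if c != "A" then !rev else rev)
  else (lo, hi, rev)
termination_by hi - lo
decreasing_by all_goals omega

def check_alt (my_long_str : List String) (my_short_str : List String) : Bool :=
  let t := altLoop my_short_str.length my_long_str 0 my_long_str.length false
  let seg := (my_long_str.drop t.1).take (t.2.1 - t.1)
  (if t.2.2 then seg.reverse else seg) == my_short_str

-- ===== PRECONDITION & SPEC =====
def Spec_check (my_long_str : List String) (my_short_str : List String) (out : Bool) : Prop := out = check_alt my_long_str my_short_str
instance (my_long_str : List String) (my_short_str : List String) (out : Bool) : Decidable (Spec_check my_long_str my_short_str out) := by unfold Spec_check; infer_instance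

-- ===== CLAIM (what is proved, stated in full; the proofs are below) =====
def Claim_equal_check : Prop := ∀ (my_long_str : List String) (my_short_str : List String), Dom_check my_long_str my_short_str → Spec_check my_long_str my_short_str (check my_long_str my_short_str)

-- ===== LEMMAS AND PROOFS =====

-- the list A's loop state corresponds to under B's (lo, hi, rev) window
def view (L : List String) (lo hi : Nat) (rev : Bool) : List String :=
  let seg := (L.drop lo).take (hi - lo)
  if rev then seg.reverse else seg

lemma view_length (L : List String) (lo hi : Nat) (h2 : hi ≤ L.length) :
    (view L lo hi rev).length = hi - lo := by
  unfold view
  cases rev <;> simp <;> omega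

lemma seg_getLast? (L : List String) (lo hi : Nat) (h0 : lo < hi) (h2 : hi ≤ L.length) :
    ((L.drop lo).take (hi - lo)).getLast? = some (L.getD (hi - 1) "") := by
  rw [List.getLast?_eq_getElem?]
  have hlen : ((L.drop lo).take (hi - lo)).length = hi - lo := by simp; omega
  rw [hlen, List.getElem?_take_of_lt (by omega), List.getElem?_drop]
  have : lo + (hi - lo - 1) = hi - 1 := by omega
  rw [this, List.getElem?_eq_getElem (by omega)]
  simp [List.getD, List.getElem?_eq_getElem (show hi - 1 < L.length by omega)]

lemma seg_head? (L : List String) (lo hi : Nat) (h0 : lo < hi) (h2 : hi ≤ L.length) :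
    ((L.drop lo).take (hi - lo)).head? = some (L.getD lo "") := by
  have hlen : ((L.drop lo).take (hi - lo)).length = hi - lo := by simp; omega
  rw [List.head?_eq_getElem?, List.getElem?_take_of_lt (by omega), List.getElem?_drop]
  rw [Nat.add_zero, List.getElem?_eq_getElem (by omega)]
  simp [List.getD, List.getElem?_eq_getElem (show lo < L.length by omega)]

lemma seg_dropLast (L : List String) (lo hi : Nat) (h2 : hi ≤ L.length) :
    ((L.drop lo).take (hi - lo)).dropLast = (L.drop lo).take (hi - 1 - lo) := by
  rw [List.dropLast_eq_take]
  rw [List.take_take]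
  congr 1
  simp
  omega

lemma seg_tail (L : List String) (lo hi : Nat) :
    ((L.drop lo).take (hi - lo)).tail = (L.drop (lo + 1)).take (hi - (lo + 1)) := by
  rw [← List.drop_one, List.drop_take, List.drop_drop, Nat.sub_sub]

lemma altLoop_main (S L : List String) :
    ∀ (n lo hi : Nat) (rev : Bool), hi - lo = n → hi ≤ L.length →
      checkLoop (view L lo hi rev) S =
        view L (altLoop S.length L lo hi rev).1 (altLoop S.length L lo hi rev).2.1
          (altLoop S.length L lo hi rev).2.2 := by
  intro n
  induction n using Nat.strong_induction_on with
  | _ n ih =>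
    intro lo hi rev hn hhi
    by_cases hgt : S.length < hi - lo
    · have hlo : lo < hi := by omega
      have hvl : (view L lo hi rev).length = hi - lo := view_length L lo hi hhi
      rw [checkLoop, altLoop, dif_pos (by rw [hvl]; omega), dif_pos (by omega)]
      cases rev with
      | false =>
        have hM : view L lo hi false = (L.drop lo).take (hi - lo) := by simp [view]
        rw [hM, seg_getLast? L lo hi hlo hhi]
        simp only [Bool.false_eq_true, if_false]
        by_cases hA : L.getD (hi - 1) "" = "A"
        · simp only [hA, beq_self_eq_true, if_true, bne_self_eq_false, Bool.false_eq_true,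
            if_false]
          rw [seg_dropLast L lo hi hhi]
          have : (L.drop lo).take (hi - 1 - lo) = view L lo (hi - 1) false := by simp [view]
          rw [this]
          exact ih (hi - 1 - lo) (by omega) lo (hi - 1) false rfl (by omega)
        · simp only [beq_iff_eq, hA, if_false, bne_iff_ne, ne_eq, not_false_eq_true, if_true,
            Bool.not_false]
          rw [seg_dropLast L lo hi hhi]
          have : ((L.drop lo).take (hi - 1 - lo)).reverse = view L lo (hi - 1) true := by
            simp [view]
          rw [this]
          exact ih (hi - 1 - lo) (by omega) lo (hi - 1) true rfl (by omega)
      | true =>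
        have hM : view L lo hi true = ((L.drop lo).take (hi - lo)).reverse := by simp [view]
        rw [hM, List.getLast?_reverse, seg_head? L lo hi hlo hhi]
        simp only [if_true]
        by_cases hA : L.getD lo "" = "A"
        · simp only [hA, beq_self_eq_true, if_true, bne_self_eq_false, Bool.false_eq_true,
            if_false]
          rw [List.dropLast_reverse, seg_tail L lo hi]
          have : ((L.drop (lo + 1)).take (hi - (lo + 1))).reverse = view L (lo + 1) hi true := by
            simp [view]
          rw [this]
          exact ih (hi - (lo + 1)) (by omega) (lo + 1) hi true rfl hhi
        · simp only [beq_iff_eq, hA, if_false, bne_iff_ne, ne_eq, not_false_eq_true, if_true,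
            Bool.not_true]
          rw [List.dropLast_reverse, List.reverse_reverse, seg_tail L lo hi]
          have : (L.drop (lo + 1)).take (hi - (lo + 1)) = view L (lo + 1) hi false := by
            simp [view]
          rw [this]
          exact ih (hi - (lo + 1)) (by omega) (lo + 1) hi false rfl hhi
    · rw [checkLoop, altLoop, dif_neg (by rw [view_length L lo hi hhi]; omega),
        dif_neg (by omega)]

-- ===== VERDICT (by name: the statement is the Claim_ definition above) =====
theorem check_spec : Claim_equal_check := by
  intro L S _hdom
  unfold Spec_check check check_alt
  have h0 : view L 0 L.length false = L := by simp [view]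
  have h := altLoop_main S L L.length 0 L.length false rfl (le_refl _)
  rw [h0] at h
  rw [h]
  unfold view
  by_cases ht : (altLoop S.length L 0 L.length false).2.2 = true
  · simp [ht, beq_eq_decide]
  · simp [ht, beq_eq_decide]
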